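-- pv_equiv track=rewrite | github.com/muzahidsife/Codeforces | Codeforces Round 939 (Div. 2)/8.py | maximize_array_sum
-- ===== SOURCE A (Python) =====
-- def maximize_array_sum(a):
--     n = len(a)
--     operations = []
--     current_sum = sum(a)
--     max_sum = current_sum
--
--     # Function to find the MEX of a subarray
--     def mex(subarray):
--         for i in range(len(subarray) + 1):
--             if i not in subarray:
--                 return i
--
--     # Main logic to maximize the sum
--     for _ in range(5 * 10**5):
--         for l in range(n):
--             for r in range(l, n):
--                 subarray = a[l:r+1]
--                 x = mex(subarray)
--                 if x > 0:
--                     operations.append((l+1, r+1))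
--                     for i in range(l, r+1):
--                         a[i] = x
--                     current_sum = sum(a)
--                     if current_sum > max_sum:
--                         max_sum = current_sum
--                     break
--             else:
--                 continue
--             break
--         else:
--             break
--
--     return max_sum, operations
-- ===== SOURCE B (Python) =====
-- def maximize_array_sum(a):
--     # Faster: l is always 0 and r is the first zero; set-based MEX on the
--     # prefix, incremental sum. Mutates `a` in place like the original.
--     operations = []
--     current_sum = sum(a)
--     max_sum = current_sum
--     budget = 5 * 10**5  # same operation budget the problem allows
--     while budget > 0 and 0 in a:
--         r = a.index(0)
--         prefix = a[:r + 1]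
--         seen = set(prefix)
--         x = 0
--         while x in seen:
--             x += 1
--         current_sum += (r + 1) * x - sum(prefix)
--         a[:r + 1] = [x] * (r + 1)
--         operations.append((1, r + 1))
--         if current_sum > max_sum:
--             max_sum = current_sum
--         budget -= 1
--     return max_sum, operations
-- ===== Notes on version B (the rewrite author's own statement) =====
-- stated objective: faster
-- what changed: Instead of rescanning all (l,r) pairs with a quadratic list-based mex each round, B observes that the chosen operation is always l=0 with r at the first zero, so it finds the first zero directly, computes the MEX of the prefix with a set, updates the sum incrementally, and rewrites the prefix in one slice assignment.
import Mathlib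
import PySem

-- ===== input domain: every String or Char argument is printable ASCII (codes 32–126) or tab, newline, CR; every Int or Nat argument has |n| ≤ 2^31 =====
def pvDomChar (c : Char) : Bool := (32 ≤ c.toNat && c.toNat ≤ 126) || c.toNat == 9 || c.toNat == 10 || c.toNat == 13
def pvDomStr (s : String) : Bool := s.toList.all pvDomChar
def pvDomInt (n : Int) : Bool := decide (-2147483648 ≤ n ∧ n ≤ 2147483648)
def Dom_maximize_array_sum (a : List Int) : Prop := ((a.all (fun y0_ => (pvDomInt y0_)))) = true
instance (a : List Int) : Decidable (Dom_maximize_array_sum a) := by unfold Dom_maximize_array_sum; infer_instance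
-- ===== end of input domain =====

-- B replaces A's repeated full (l,r) scan with a direct first-zero / set-MEX / incremental-sum
-- step (measured faster, asymptotically); both Pythons mutate `a` in place identically, the
-- equivalence proved here is about the return value.

-- ===== PORT A =====

-- mex(subarray): 'for i in range(len(subarray)+1): if i not in subarray: return i'.
-- Python's loop always returns (a list of length k cannot contain all of 0..k), so the
-- 'none' default 0 below is unreachable.
def mexA (sub : List Int) : Int :=
  match (List.range (sub.length + 1)).find? (fun i => !(sub.contains (Int.ofNat i))) with
  | some i => Int.ofNat i
  | none => 0

-- the nested 'for l … for r …' search for the first pair with mex > 0, returning (l, r, x)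
def findOpA (a : List Int) : Option (Nat × Nat × Int) :=
  (List.range a.length).findSome? (fun (l : Nat) =>
    (List.range' l (a.length - l)).findSome? (fun (r : Nat) =>
      let sub := PySem.List.slice a (some (l : Int)) (some ((r : Int) + 1))
      let x := mexA sub
      if x > 0 then some (l, r, x) else none))

-- 'for _ in range(5*10**5)' with the two-level break/else structure
def loopA : Nat → List Int → List (Int × Int) → Int → Int → Int × List (Int × Int)
  | 0, _, ops, _, maxS => (maxS, ops)
  | fuel + 1, a, ops, _, maxS =>
    match findOpA a with
    | none => (maxS, ops)
    | some (l, r, x) =>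
      let ops' := ops ++ [((l : Int) + 1, (r : Int) + 1)]
      let a' := (List.range' l (r + 1 - l)).foldl (fun acc i => acc.set i x) a
      let cur' := a'.sum
      let max' := if cur' > maxS then cur' else maxS
      loopA fuel a' ops' cur' max'

def maximize_array_sum (a : List Int) : Int × (List (Int × Int)) :=
  loopA (5 * 10 ^ 5) a [] a.sum a.sum

-- ===== PORT B =====

-- 'x = 0; while x in seen: x += 1' — seen is a set of ≤ seen.length distinct values, so the
-- loop stops within seen.length + 1 steps; the fuel is provably sufficient.
def whileMexB (seen : List Int) : Nat → Nat → Nat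
  | x, 0 => x
  | x, fuel + 1 => if seen.contains (Int.ofNat x) then whileMexB seen (x + 1) fuel else x

def loopB : Nat → List Int → List (Int × Int) → Int → Int → Int × (List (Int × Int))
  | 0, _, ops, _, maxS => (maxS, ops)
  | budget + 1, a, ops, curS, maxS =>
    match PySem.List.index? a 0 with      -- '0 in a' + 'a.index(0)'
    | none => (maxS, ops)
    | some r =>
      let pre := PySem.List.slice a none (some ((r : Int) + 1))
      let seen := PySem.Set.ofList pre
      let x : Int := Int.ofNat (whileMexB seen 0 (seen.length + 1))
      let cur' := curS + ((r : Int) + 1) * x - pre.sum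
      let a' := List.replicate (r + 1) x ++ a.drop (r + 1)   -- a[:r+1] = [x]*(r+1)
      let ops' := ops ++ [(1, (r : Int) + 1)]
      let max' := if cur' > maxS then cur' else maxS
      loopB budget a' ops' cur' max'

def maximize_array_sum_alt (a : List Int) : Int × (List (Int × Int)) :=
  loopB (5 * 10 ^ 5) a [] a.sum a.sum

-- ===== PRECONDITION & SPEC =====
def Spec_maximize_array_sum (a : List Int) (out : Int × (List (Int × Int))) : Prop := out = maximize_array_sum_alt a
instance (a : List Int) (out : Int × (List (Int × Int))) : Decidable (Spec_maximize_array_sum a out) := by unfold Spec_maximize_array_sum; infer_instance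

-- ===== CLAIM (what is proved, stated in full; the proofs are below) =====
def Claim_equal_maximize_array_sum : Prop := ∀ (a : List Int), Dom_maximize_array_sum a → Spec_maximize_array_sum a (maximize_array_sum a)

-- ===== LEMMAS AND PROOFS =====


-- every j < m occurs in s, so s has at least m (distinct) elements
theorem pv_card_of_below (s : List Int) (m : Nat) (h : ∀ j < m, Int.ofNat j ∈ s) : m ≤ s.length := by
  have hsub : (List.range m).map Int.ofNat ⊆ s := by
    intro x hx
    simp only [List.mem_map, List.mem_range] at hx
    obtain ⟨j, hj, rfl⟩ := hx
    exact h j hj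
  have hnd : ((List.range m).map Int.ofNat).Nodup :=
    (List.nodup_range).map (fun a b hab => Int.ofNat.inj hab)
  have := (List.subperm_of_subset hnd hsub).length_le
  simpa using this

theorem pv_mex_exists (sub : List Int) : ∃ i : Nat, Int.ofNat i ∉ sub := by
  by_contra h
  push Not at h
  have := pv_card_of_below sub (sub.length + 1) (fun j _ => h j)
  omega

-- the least natural number (as an Int) not occurring in sub
def mexN (sub : List Int) : Nat := Nat.find (pv_mex_exists sub)

theorem mexN_not_mem (sub : List Int) : Int.ofNat (mexN sub) ∉ sub := Nat.find_spec (pv_mex_exists sub)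

theorem mexN_mem (sub : List Int) {j : Nat} (hj : j < mexN sub) : Int.ofNat j ∈ sub := by
  have := Nat.find_min (pv_mex_exists sub) hj
  simpa using this

theorem mexN_le (sub : List Int) : mexN sub ≤ sub.length :=
  pv_card_of_below sub (mexN sub) (fun _ hj => mexN_mem sub hj)

theorem pv_find?_range_eq (p : Nat → Bool) (n m : Nat) (hm : m < n) (hp : p m = true)
    (hmin : ∀ j < m, p j = false) : (List.range n).find? p = some m := by
  induction n with
  | zero => omega
  | succ k ih =>
    rw [List.range_succ, List.find?_append]
    rcases Nat.lt_or_ge m k with h | h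
    · rw [ih h]; rfl
    · have hmk : m = k := by omega
      subst hmk
      have h1 : (List.range m).find? p = none := by
        rw [List.find?_eq_none]
        intro x hx
        simp only [List.mem_range] at hx
        simp [hmin x hx]
      rw [h1]
      simp [hp]

theorem mexA_eq (sub : List Int) : mexA sub = Int.ofNat (mexN sub) := by
  unfold mexA
  have hfind : (List.range (sub.length + 1)).find? (fun i => !(sub.contains (Int.ofNat i)))
      = some (mexN sub) := by
    apply pv_find?_range_eq
    · have := mexN_le sub; omega
    · simpa using mexN_not_mem sub
    · intro j hj
      simpa using mexN_mem sub hj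
  rw [hfind]

theorem mexA_pos_iff (sub : List Int) : 0 < mexA sub ↔ (0 : Int) ∈ sub := by
  rw [mexA_eq]
  constructor
  · intro h
    rw [show Int.ofNat (mexN sub) = ((mexN sub : Nat) : Int) from rfl] at h
    have h0 : 0 < mexN sub := by exact_mod_cast h
    have := mexN_mem sub h0
    simpa using this
  · intro h
    have h0 : mexN sub ≠ 0 := by
      intro h0
      have := mexN_not_mem sub
      rw [h0] at this
      exact this (by simpa using h)
    have h1 : 0 < mexN sub := Nat.pos_of_ne_zero h0
    rw [show Int.ofNat (mexN sub) = ((mexN sub : Nat) : Int) from rfl]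
    exact_mod_cast h1

theorem whileMexB_eq (seen : List Int) (m : Nat) (hnot : Int.ofNat m ∉ seen)
    (hmem : ∀ j < m, Int.ofNat j ∈ seen) :
    ∀ fuel x, x ≤ m → m < x + fuel → whileMexB seen x fuel = m := by
  intro fuel
  induction fuel with
  | zero => intro x h1 h2; omega
  | succ f ih =>
    intro x h1 h2
    rcases Nat.lt_or_ge x m with h | h
    · have hc : seen.contains (Int.ofNat x) = true := by
        simpa using hmem x h
      simp only [whileMexB, hc, if_true]
      exact ih (x + 1) (by omega) (by omega)
    · have hx : x = m := by omega
      subst hx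
      have hc : seen.contains (Int.ofNat x) = false := by
        simpa using hnot
      simp only [whileMexB]
      rw [hc]
      simp

theorem whileMexB_ofList (pre : List Int) :
    whileMexB (PySem.Set.ofList pre) 0 ((PySem.Set.ofList pre).length + 1) = mexN pre := by
  have hmem : ∀ j < mexN pre, Int.ofNat j ∈ PySem.Set.ofList pre := by
    intro j hj
    rw [PySem.Set.mem_ofList]
    exact mexN_mem pre hj
  have hnot : Int.ofNat (mexN pre) ∉ PySem.Set.ofList pre := by
    rw [PySem.Set.mem_ofList]
    exact mexN_not_mem pre
  have hle : mexN pre ≤ (PySem.Set.ofList pre).length :=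
    pv_card_of_below _ _ hmem
  exact whileMexB_eq _ _ hnot hmem _ 0 (Nat.zero_le _) (by omega)

-- first-zero characterisation of membership of 0 in prefixes
theorem pv_zero_mem_take_iff (a : List Int) (r : Nat) (hr : r < a.length) (hget : a[r] = 0)
    (hmin : ∀ (j : Nat) (hj : j < r), a[j] ≠ 0) (k : Nat) :
    ((0 : Int) ∈ a.take (k + 1)) ↔ r ≤ k := by
  constructor
  · intro h
    rw [List.mem_take_iff_getElem] at h
    obtain ⟨j, hj, hja⟩ := h
    rcases Nat.lt_or_ge j r with hlt | hge
    · exact absurd hja (hmin j hlt)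
    · omega
  · intro h
    rw [List.mem_take_iff_getElem]
    exact ⟨r, by omega, hget⟩

theorem findOpA_eq_none (a : List Int) (h : PySem.List.index? a 0 = none) : findOpA a = none := by
  have h0 : (0 : Int) ∉ a := (PySem.List.index?_eq_none_iff a 0).mp h
  unfold findOpA
  rw [List.findSome?_eq_none_iff]
  intro l _
  rw [List.findSome?_eq_none_iff]
  intro r _
  simp only
  have hneg : ∀ (b1 b2 : Option Int), ¬ 0 < mexA (PySem.List.slice a b1 b2) := by
    intro b1 b2 hpos
    exact h0 (PySem.List.mem_of_mem_slice a b1 b2 ((mexA_pos_iff _).mp hpos))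
  simp [hneg _ _]

theorem findOpA_eq_some (a : List Int) (r : Nat) (h : PySem.List.index? a 0 = some r) :
    findOpA a = some (0, r, mexA (a.take (r + 1))) := by
  obtain ⟨hr, hget, hmin⟩ := PySem.List.getElem_of_index?_eq_some h
  have hmemr : (0 : Int) ∈ a.take (r + 1) := (pv_zero_mem_take_iff a r hr hget hmin r).mpr le_rfl
  -- the inner search at l = 0 finds exactly r
  have hinner : (List.range' 0 (a.length - 0)).findSome? (fun (r' : Nat) =>
      let sub := PySem.List.slice a (some ((0 : Nat) : Int)) (some ((r' : Int) + 1))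
      let x := mexA sub
      if x > 0 then some ((0 : Nat), r', x) else none) = some (0, r, mexA (a.take (r + 1))) := by
    have hsplit : List.range' 0 (a.length - 0) = List.range' 0 r ++ List.range' (0 + r) (a.length - r) := by
      rw [List.range'_append_1]
      congr 1
      omega
    rw [hsplit, List.findSome?_append]
    have hfirst : (List.range' 0 r).findSome? (fun (r' : Nat) =>
        let sub := PySem.List.slice a (some ((0 : Nat) : Int)) (some ((r' : Int) + 1))
        let x := mexA sub
        if x > 0 then some ((0 : Nat), r', x) else none) = none := by
      rw [List.findSome?_eq_none_iff]
      intro r' hr'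
      have hlt : r' < r := by
        have := List.mem_range'_1.mp hr'
        omega
      have hsub : PySem.List.slice a none (some ((r' : Int) + 1)) = a.take (r' + 1) := by
        have h1 : ((r' : Int) + 1) = ((r' + 1 : Nat) : Int) := by push_cast; ring
        rw [h1, PySem.List.slice_to_natCast]
      have hneg : ¬ 0 < mexA (a.take (r' + 1)) := by
        intro hpos
        have := (mexA_pos_iff _).mp hpos
        rw [pv_zero_mem_take_iff a r hr hget hmin r'] at this
        omega
      simp [hsub, hneg]
    rw [hfirst]
    have hrest : List.range' (0 + r) (a.length - r) = r :: List.range' (r + 1) (a.length - r - 1) := by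
      have hlen : a.length - r = (a.length - r - 1) + 1 := by omega
      rw [hlen, List.range'_succ]
      simp
    rw [hrest, List.findSome?_cons]
    have hsub : PySem.List.slice a none (some ((r : Int) + 1)) = a.take (r + 1) := by
      have h1 : ((r : Int) + 1) = ((r + 1 : Nat) : Int) := by push_cast; ring
      rw [h1, PySem.List.slice_to_natCast]
    have hpos : 0 < mexA (a.take (r + 1)) := (mexA_pos_iff _).mpr hmemr
    simp [hsub, hpos]
  -- outer search: the first l (= 0) already yields some
  unfold findOpA
  obtain ⟨k, hk⟩ : ∃ k, a.length = k + 1 := ⟨a.length - 1, by omega⟩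
  rw [hk, List.range_succ_eq_map, List.findSome?_cons]
  rw [hk] at hinner
  rw [hinner]

-- A's element-by-element assignment loop is the slice assignment
theorem pv_foldl_set_eq (x : Int) : ∀ (k : Nat) (a : List Int), k ≤ a.length →
    (List.range' 0 k).foldl (fun acc i => acc.set i x) a = List.replicate k x ++ a.drop k := by
  intro k
  induction k with
  | zero => intro a _; simp
  | succ m ih =>
    intro a hk
    rw [List.range'_1_concat, List.foldl_append, ih a (by omega)]
    simp only [List.foldl_cons, List.foldl_nil, Nat.zero_add]
    rw [List.set_append]
    have hlen : (List.replicate m x).length = m := List.length_replicate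
    rw [hlen]
    simp only [lt_irrefl, if_false, Nat.sub_self]
    rw [List.drop_eq_getElem_cons (by omega : m < a.length), List.set_cons_zero,
      List.replicate_succ', List.append_assoc]
    rfl

theorem pv_sum_after (a : List Int) (r : Nat) (x : Int) :
    (List.replicate (r + 1) x ++ a.drop (r + 1)).sum
      = a.sum + ((r : Int) + 1) * x - (a.take (r + 1)).sum := by
  rw [List.sum_append]
  have hsplit := List.sum_take_add_sum_drop a (r + 1)
  have hrep : (List.replicate (r + 1) x).sum = ((r : Int) + 1) * x := by
    rw [List.sum_replicate]
    ring
  rw [hrep]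
  linarith

theorem loop_eq (fuel : Nat) : ∀ (a : List Int) (ops : List (Int × Int)) (curS maxS : Int),
    curS = a.sum → loopA fuel a ops curS maxS = loopB fuel a ops curS maxS := by
  induction fuel with
  | zero => intro a ops curS maxS _; rfl
  | succ f ih =>
    intro a ops curS maxS hcur
    cases hidx : PySem.List.index? a 0 with
    | none =>
      rw [show loopA (f + 1) a ops curS maxS = (match findOpA a with
        | none => (maxS, ops)
        | some (l, r, x) =>
          let ops' := ops ++ [((l : Int) + 1, (r : Int) + 1)]
          let a' := (List.range' l (r + 1 - l)).foldl (fun acc i => acc.set i x) a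
          let cur' := a'.sum
          let max' := if cur' > maxS then cur' else maxS
          loopA f a' ops' cur' max') from rfl]
      rw [findOpA_eq_none a hidx]
      rw [show loopB (f + 1) a ops curS maxS = (maxS, ops) from by
        simp only [loopB, hidx]]
    | some r =>
      obtain ⟨hr, hget, hmin⟩ := PySem.List.getElem_of_index?_eq_some hidx
      have hpre : PySem.List.slice a none (some ((r : Int) + 1)) = a.take (r + 1) := by
        have h1 : ((r : Int) + 1) = ((r + 1 : Nat) : Int) := by push_cast; ring
        rw [h1, PySem.List.slice_to_natCast]
      have hx : Int.ofNat (whileMexB (PySem.Set.ofList (a.take (r + 1))) 0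
          ((PySem.Set.ofList (a.take (r + 1))).length + 1)) = mexA (a.take (r + 1)) := by
        rw [whileMexB_ofList, mexA_eq]
      have ha' : (List.range' 0 (r + 1 - 0)).foldl
            (fun acc i => acc.set i (mexA (a.take (r + 1)))) a
          = List.replicate (r + 1) (mexA (a.take (r + 1))) ++ a.drop (r + 1) := by
        have := pv_foldl_set_eq (mexA (a.take (r + 1))) (r + 1) a (by omega)
        simpa using this
      have hsum : (List.replicate (r + 1) (mexA (a.take (r + 1))) ++ a.drop (r + 1)).sum
          = curS + ((r : Int) + 1) * mexA (a.take (r + 1)) - (a.take (r + 1)).sum := by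
        rw [pv_sum_after, hcur]
      calc loopA (f + 1) a ops curS maxS
          = loopA f (List.replicate (r + 1) (mexA (a.take (r + 1))) ++ a.drop (r + 1))
              (ops ++ [(1, (r : Int) + 1)])
              ((List.replicate (r + 1) (mexA (a.take (r + 1))) ++ a.drop (r + 1)).sum)
              (if (List.replicate (r + 1) (mexA (a.take (r + 1))) ++ a.drop (r + 1)).sum > maxS
                then (List.replicate (r + 1) (mexA (a.take (r + 1))) ++ a.drop (r + 1)).sum
                else maxS) := by
            simp only [loopA, findOpA_eq_some a r hidx, ha']
            norm_num
        _ = loopB f (List.replicate (r + 1) (mexA (a.take (r + 1))) ++ a.drop (r + 1))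
              (ops ++ [(1, (r : Int) + 1)])
              ((List.replicate (r + 1) (mexA (a.take (r + 1))) ++ a.drop (r + 1)).sum)
              (if (List.replicate (r + 1) (mexA (a.take (r + 1))) ++ a.drop (r + 1)).sum > maxS
                then (List.replicate (r + 1) (mexA (a.take (r + 1))) ++ a.drop (r + 1)).sum
                else maxS) := ih _ _ _ _ rfl
        _ = loopB (f + 1) a ops curS maxS := by
            simp only [loopB, hidx, hpre, hx, hsum]


-- ===== VERDICT (by name: the statement is the Claim_ definition above) =====
theorem maximize_array_sum_spec : Claim_equal_maximize_array_sum := by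
  intro a _
  unfold Spec_maximize_array_sum maximize_array_sum maximize_array_sum_alt
  exact loop_eq _ a [] a.sum a.sum rfl
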